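-- pv_equiv track=rewrite | github.com/posl/comment_recommendation | script/split_gen/5_time/ja/241_C/3.py | check
-- ===== SOURCE A (Python) =====
-- def check(N, S):
--     for i in range(N):
--         for j in range(N):
--             if S[i][j] == "#":
--                 if i <= N - 6:
--                     if S[i + 1][j] == "#" and S[i + 2][j] == "#" and S[i + 3][j] == "#" and S[i + 4][j] == "#" and S[i + 5][j] == "#":
--                         return True
--                 if j <= N - 6:
--                     if S[i][j + 1] == "#" and S[i][j + 2] == "#" and S[i][j + 3] == "#" and S[i][j + 4] == "#" and S[i][j + 5] == "#":
--                         return True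
--                 if i <= N - 6 and j <= N - 6:
--                     if S[i + 1][j + 1] == "#" and S[i + 2][j + 2] == "#" and S[i + 3][j + 3] == "#" and S[i + 4][j + 4] == "#" and S[i + 5][j + 5] == "#":
--                         return True
--                 if i <= N - 6 and j >= 5:
--                     if S[i + 1][j - 1] == "#" and S[i + 2][j - 2] == "#" and S[i + 3][j - 3] == "#" and S[i + 4][j - 4] == "#" and S[i + 5][j - 5] == "#":
--                         return True
--     return False
-- ===== SOURCE B (Python) =====
-- def check(N, S):
--     rows = [S[i][:N] for i in range(N)]
--     lines = list(rows)
--     lines += [''.join(r[j] for r in rows) for j in range(N)]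
--     lines += [''.join(rows[i][i - d] for i in range(max(d, 0), min(N, N + d)))
--               for d in range(-(N - 1), N)]
--     lines += [''.join(rows[i][s - i] for i in range(max(0, s - N + 1), min(N, s + 1)))
--               for s in range(2 * N - 1)]
--     return any('######' in line for line in lines)
-- ===== Notes on version B (the rewrite author's own statement) =====
-- stated objective: idiomatic
-- what changed: Replaces A's per-cell probing of five offsets in four directions with building every row, column, diagonal and anti-diagonal as a line and testing whether '######' is a substring of any line.
-- outside the precondition, e.g. on check(6, ['######', 'x', '......', '......', '......', '......']): A returns True, B raises IndexError
import Mathlib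
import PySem

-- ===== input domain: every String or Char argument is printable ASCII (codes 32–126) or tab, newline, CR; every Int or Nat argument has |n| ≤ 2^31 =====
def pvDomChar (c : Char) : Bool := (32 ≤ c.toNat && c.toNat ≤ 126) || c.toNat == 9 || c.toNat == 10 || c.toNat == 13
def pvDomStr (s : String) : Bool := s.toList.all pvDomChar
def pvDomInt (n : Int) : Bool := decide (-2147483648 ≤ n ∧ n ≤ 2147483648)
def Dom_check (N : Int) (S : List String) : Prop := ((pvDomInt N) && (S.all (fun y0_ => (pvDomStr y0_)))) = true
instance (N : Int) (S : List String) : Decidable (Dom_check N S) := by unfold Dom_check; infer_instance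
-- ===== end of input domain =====

-- B builds every row/column/diagonal/anti-diagonal as a line and searches '######' in each,
-- instead of A's per-cell four-direction offset probing (objective: idiomatic; same asymptotic cost).

-- ===== PORT A =====
-- S[i][j] as an optional char (none exactly where Python raises IndexError)
def pvCell (S : List String) (i j : Int) : Option Char :=
  match PySem.List.pyGet? S i with
  | some row => PySem.Str.pyGet? row j
  | none => none

def check (N : Int) (S : List String) : Bool :=
  (PySem.List.pyRange 0 N 1).any (fun i =>
    (PySem.List.pyRange 0 N 1).any (fun j =>
      pvCell S i j == some '#' &&
        ((decide (i ≤ N - 6) &&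
            (pvCell S (i+1) j == some '#' && pvCell S (i+2) j == some '#' &&
             pvCell S (i+3) j == some '#' && pvCell S (i+4) j == some '#' &&
             pvCell S (i+5) j == some '#')) ||
         (decide (j ≤ N - 6) &&
            (pvCell S i (j+1) == some '#' && pvCell S i (j+2) == some '#' &&
             pvCell S i (j+3) == some '#' && pvCell S i (j+4) == some '#' &&
             pvCell S i (j+5) == some '#')) ||
         (decide (i ≤ N - 6) && decide (j ≤ N - 6) &&
            (pvCell S (i+1) (j+1) == some '#' && pvCell S (i+2) (j+2) == some '#' &&
             pvCell S (i+3) (j+3) == some '#' && pvCell S (i+4) (j+4) == some '#' &&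
             pvCell S (i+5) (j+5) == some '#')) ||
         (decide (i ≤ N - 6) && decide (5 ≤ j) &&
            (pvCell S (i+1) (j-1) == some '#' && pvCell S (i+2) (j-2) == some '#' &&
             pvCell S (i+3) (j-3) == some '#' && pvCell S (i+4) (j-4) == some '#' &&
             pvCell S (i+5) (j-5) == some '#')))))

-- ===== PORT B =====
-- rows = [S[i][:N] for i in range(N)]
def pvRows (N : Int) (S : List String) : List (List Char) :=
  (PySem.List.pyRange 0 N 1).map (fun i =>
    PySem.List.slice (PySem.List.pyGetD S i "").toList none (some N))

def check_alt (N : Int) (S : List String) : Bool :=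
  let rows := pvRows N S
  let cols := (PySem.List.pyRange 0 N 1).map (fun j =>
    rows.map (fun r => PySem.List.pyGetD r j ' '))
  let diags := (PySem.List.pyRange (-(N-1)) N 1).map (fun d =>
    (PySem.List.pyRange (max d 0) (min N (N+d)) 1).map (fun i =>
      PySem.List.pyGetD (PySem.List.pyGetD rows i []) (i - d) ' '))
  let antis := (PySem.List.pyRange 0 (2*N-1) 1).map (fun s2 =>
    (PySem.List.pyRange (max 0 (s2-N+1)) (min N (s2+1)) 1).map (fun i =>
      PySem.List.pyGetD (PySem.List.pyGetD rows i []) (s2 - i) ' '))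
  (rows ++ cols ++ diags ++ antis).any (fun l => PySem.Chars.isIn "######".toList l)

-- ===== PRECONDITION & SPEC =====
-- Pre_ excludes inputs where S has fewer than N rows or one of the first N rows is shorter
-- than N: there A may raise IndexError or return an early True depending on scan position,
-- and B raises IndexError while building its column lines.
def Pre_check (N : Int) (S : List String) : Prop :=
  N ≤ (S.length : Int) ∧ ∀ s ∈ S.take N.toNat, N ≤ (s.toList.length : Int)
instance (N : Int) (S : List String) : Decidable (Pre_check N S) := by
  unfold Pre_check; infer_instance

def pvWitness_check : Int × List String :=
  (6, ["######", "......", "......", "......", "......", "......"])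

def Spec_check (N : Int) (S : List String) (out : Bool) : Prop := out = check_alt N S
instance (N : Int) (S : List String) (out : Bool) : Decidable (Spec_check N S out) := by
  unfold Spec_check; infer_instance

-- ===== CLAIM (what is proved, stated in full; the proofs are below) =====
def Claim_equal_check : Prop := ∀ (N : Int) (S : List String),
  Dom_check N S → Pre_check N S → Spec_check N S (check N S)


-- ===== LEMMAS AND PROOFS =====

-- grid character at (i, j), Nat coordinates
def pvG (S : List String) (i j : Nat) : Char := ((S.getD i "").toList).getD j ' '

-- canonical description of "the grid has six consecutive '#' in some direction",
-- with the start cell chosen topmost (and, for rows, leftmost) as A does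
def pvRun (N : Int) (S : List String) : Prop :=
  ∃ i j : Nat, i < N.toNat ∧ j < N.toNat ∧
    ( (i + 6 ≤ N.toNat ∧ ∀ t < 6, pvG S (i+t) j = '#')
    ∨ (j + 6 ≤ N.toNat ∧ ∀ t < 6, pvG S i (j+t) = '#')
    ∨ (i + 6 ≤ N.toNat ∧ j + 6 ≤ N.toNat ∧ ∀ t < 6, pvG S (i+t) (j+t) = '#')
    ∨ (i + 6 ≤ N.toNat ∧ 5 ≤ j ∧ ∀ t < 6, pvG S (i+t) (j-t) = '#') )

lemma mem_take_pre (N : Int) (S : List String) {i : Nat} (hi : i < N.toNat) (hlen : i < S.length) :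
    S.getD i "" ∈ S.take N.toNat := by
  have h : (S.take N.toNat)[i]'(by simp; omega) = S[i] := List.getElem_take
  rw [List.getD_eq_getElem S "" hlen, ← h]
  exact List.getElem_mem _

lemma row_long (N : Int) (S : List String) (hPre : Pre_check N S) {a : Nat}
    (ha : a < N.toNat) : N ≤ ((S.getD a "").toList.length : Int) :=
  hPre.2 _ (mem_take_pre N S ha (by have := hPre.1; omega))

lemma pvCell_eq (N : Int) (S : List String) (hPre : Pre_check N S) {a b : Nat}
    (ha : a < N.toNat) (hb : b < N.toNat) :
    pvCell S (a : Int) (b : Int) = some (pvG S a b) := by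
  have hiS : a < S.length := by have := hPre.1; omega
  have hjR : b < (S.getD a "").toList.length := by have := row_long N S hPre ha; omega
  have hS : PySem.List.pyGet? S (a : Int) = some (S.getD a "") := by
    rw [PySem.List.pyGet?_natCast, List.getElem?_eq_getElem hiS, List.getD_eq_getElem S "" hiS]
  rw [pvCell, hS]
  generalize hR : S.getD a "" = row at hjR
  rw [pvG, hR]
  simp only [PySem.Str.pyGet?_natCast]
  rw [List.getElem?_eq_getElem hjR, List.getD_eq_getElem _ ' ' hjR]

lemma key' (N : Int) (S : List String) (hPre : Pre_check N S) {i j : Int}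
    (h1 : 0 ≤ i) (h2 : i < N) (h3 : 0 ≤ j) (h4 : j < N) :
    ((pvCell S i j == some '#') = true ↔ pvG S i.toNat j.toNat = '#') := by
  have h := pvCell_eq N S hPre (a := i.toNat) (b := j.toNat) (by omega) (by omega)
  rw [Int.toNat_of_nonneg h1, Int.toNat_of_nonneg h3] at h
  rw [h]
  simp

lemma check_iff (N : Int) (S : List String) (hPre : Pre_check N S) :
    check N S = true ↔ pvRun N S := by
  simp only [check, List.any_eq_true, PySem.List.mem_pyRange_one, Bool.and_eq_true,
    Bool.or_eq_true, decide_eq_true_eq]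
  constructor
  · rintro ⟨i, ⟨hi0, hiN⟩, j, ⟨hj0, hjN⟩, hc, hrest⟩
    have K := fun {i' j' : Int} (a1 : 0 ≤ i') (a2 : i' < N) (a3 : 0 ≤ j') (a4 : j' < N) =>
      (key' N S hPre a1 a2 a3 a4).mp
    refine ⟨i.toNat, j.toNat, by omega, by omega, ?_⟩
    have hc' : pvG S i.toNat j.toNat = '#' := K hi0 hiN hj0 hjN hc
    rcases hrest with (((⟨hg, ⟨⟨⟨⟨h1, h2⟩, h3⟩, h4⟩, h5⟩⟩ | ⟨hg, ⟨⟨⟨⟨h1, h2⟩, h3⟩, h4⟩, h5⟩⟩) | ⟨⟨hg, hg'⟩, ⟨⟨⟨⟨h1, h2⟩, h3⟩, h4⟩, h5⟩⟩) | ⟨⟨hg, hg'⟩, ⟨⟨⟨⟨h1, h2⟩, h3⟩, h4⟩, h5⟩⟩)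
    · left
      have e1 := K (by omega : (0:Int) ≤ i+1) (by omega) (by omega : (0:Int) ≤ j) (by omega) h1
      have e2 := K (by omega : (0:Int) ≤ i+2) (by omega) (by omega : (0:Int) ≤ j) (by omega) h2
      have e3 := K (by omega : (0:Int) ≤ i+3) (by omega) (by omega : (0:Int) ≤ j) (by omega) h3
      have e4 := K (by omega : (0:Int) ≤ i+4) (by omega) (by omega : (0:Int) ≤ j) (by omega) h4
      have e5 := K (by omega : (0:Int) ≤ i+5) (by omega) (by omega : (0:Int) ≤ j) (by omega) h5
      refine ⟨by omega, ?_⟩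
      intro t ht
      interval_cases t
      · simpa using hc'
      · rw [show i.toNat + 1 = (i+1).toNat by omega]; exact e1
      · rw [show i.toNat + 2 = (i+2).toNat by omega]; exact e2
      · rw [show i.toNat + 3 = (i+3).toNat by omega]; exact e3
      · rw [show i.toNat + 4 = (i+4).toNat by omega]; exact e4
      · rw [show i.toNat + 5 = (i+5).toNat by omega]; exact e5
    · right
      left
      have e1 := K (by omega : (0:Int) ≤ i) (by omega) (by omega : (0:Int) ≤ j+1) (by omega) h1
      have e2 := K (by omega : (0:Int) ≤ i) (by omega) (by omega : (0:Int) ≤ j+2) (by omega) h2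
      have e3 := K (by omega : (0:Int) ≤ i) (by omega) (by omega : (0:Int) ≤ j+3) (by omega) h3
      have e4 := K (by omega : (0:Int) ≤ i) (by omega) (by omega : (0:Int) ≤ j+4) (by omega) h4
      have e5 := K (by omega : (0:Int) ≤ i) (by omega) (by omega : (0:Int) ≤ j+5) (by omega) h5
      refine ⟨by omega, ?_⟩
      intro t ht
      interval_cases t
      · simpa using hc'
      · rw [show j.toNat + 1 = (j+1).toNat by omega]; exact e1
      · rw [show j.toNat + 2 = (j+2).toNat by omega]; exact e2
      · rw [show j.toNat + 3 = (j+3).toNat by omega]; exact e3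
      · rw [show j.toNat + 4 = (j+4).toNat by omega]; exact e4
      · rw [show j.toNat + 5 = (j+5).toNat by omega]; exact e5
    · right
      right
      left
      have e1 := K (by omega : (0:Int) ≤ i+1) (by omega) (by omega : (0:Int) ≤ j+1) (by omega) h1
      have e2 := K (by omega : (0:Int) ≤ i+2) (by omega) (by omega : (0:Int) ≤ j+2) (by omega) h2
      have e3 := K (by omega : (0:Int) ≤ i+3) (by omega) (by omega : (0:Int) ≤ j+3) (by omega) h3
      have e4 := K (by omega : (0:Int) ≤ i+4) (by omega) (by omega : (0:Int) ≤ j+4) (by omega) h4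
      have e5 := K (by omega : (0:Int) ≤ i+5) (by omega) (by omega : (0:Int) ≤ j+5) (by omega) h5
      refine ⟨by omega, by omega, ?_⟩
      intro t ht
      interval_cases t
      · simpa using hc'
      · rw [show i.toNat + 1 = (i+1).toNat by omega, show j.toNat + 1 = (j+1).toNat by omega]; exact e1
      · rw [show i.toNat + 2 = (i+2).toNat by omega, show j.toNat + 2 = (j+2).toNat by omega]; exact e2
      · rw [show i.toNat + 3 = (i+3).toNat by omega, show j.toNat + 3 = (j+3).toNat by omega]; exact e3
      · rw [show i.toNat + 4 = (i+4).toNat by omega, show j.toNat + 4 = (j+4).toNat by omega]; exact e4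
      · rw [show i.toNat + 5 = (i+5).toNat by omega, show j.toNat + 5 = (j+5).toNat by omega]; exact e5
    · right
      right
      right
      have e1 := K (by omega : (0:Int) ≤ i+1) (by omega) (by omega : (0:Int) ≤ j-1) (by omega) h1
      have e2 := K (by omega : (0:Int) ≤ i+2) (by omega) (by omega : (0:Int) ≤ j-2) (by omega) h2
      have e3 := K (by omega : (0:Int) ≤ i+3) (by omega) (by omega : (0:Int) ≤ j-3) (by omega) h3
      have e4 := K (by omega : (0:Int) ≤ i+4) (by omega) (by omega : (0:Int) ≤ j-4) (by omega) h4
      have e5 := K (by omega : (0:Int) ≤ i+5) (by omega) (by omega : (0:Int) ≤ j-5) (by omega) h5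
      refine ⟨by omega, by omega, ?_⟩
      intro t ht
      interval_cases t
      · simpa using hc'
      · rw [show i.toNat + 1 = (i+1).toNat by omega, show j.toNat - 1 = (j-1).toNat by omega]; exact e1
      · rw [show i.toNat + 2 = (i+2).toNat by omega, show j.toNat - 2 = (j-2).toNat by omega]; exact e2
      · rw [show i.toNat + 3 = (i+3).toNat by omega, show j.toNat - 3 = (j-3).toNat by omega]; exact e3
      · rw [show i.toNat + 4 = (i+4).toNat by omega, show j.toNat - 4 = (j-4).toNat by omega]; exact e4
      · rw [show i.toNat + 5 = (i+5).toNat by omega, show j.toNat - 5 = (j-5).toNat by omega]; exact e5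
  · rintro ⟨a, b, ha, hb, hcase⟩
    have K := fun {i' j' : Int} (a1 : 0 ≤ i') (a2 : i' < N) (a3 : 0 ≤ j') (a4 : j' < N) =>
      (key' N S hPre a1 a2 a3 a4).mpr
    refine ⟨(a : Int), ⟨by omega, by omega⟩, (b : Int), ⟨by omega, by omega⟩, ?_, ?_⟩
    · rcases hcase with ⟨hg, hall⟩ | ⟨hg, hall⟩ | ⟨hg, hg', hall⟩ | ⟨hg, hg', hall⟩ <;>
      · apply K (by omega) (by omega) (by omega) (by omega)
        rw [show ((a : Int)).toNat = a by omega, show ((b : Int)).toNat = b by omega]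
        simpa using hall 0 (by omega)
    · rcases hcase with ⟨hg, hall⟩ | ⟨hg, hall⟩ | ⟨hg, hg', hall⟩ | ⟨hg, hg', hall⟩
      · left
        left
        left
        refine ⟨by omega, ⟨⟨⟨⟨?_, ?_⟩, ?_⟩, ?_⟩, ?_⟩⟩
        · apply K (by omega) (by omega) (by omega) (by omega)
          rw [show ((a : Int) + 1).toNat = a + 1 by omega, show ((b : Int)).toNat = b by omega]
          exact hall 1 (by omega)
        · apply K (by omega) (by omega) (by omega) (by omega)
          rw [show ((a : Int) + 2).toNat = a + 2 by omega, show ((b : Int)).toNat = b by omega]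
          exact hall 2 (by omega)
        · apply K (by omega) (by omega) (by omega) (by omega)
          rw [show ((a : Int) + 3).toNat = a + 3 by omega, show ((b : Int)).toNat = b by omega]
          exact hall 3 (by omega)
        · apply K (by omega) (by omega) (by omega) (by omega)
          rw [show ((a : Int) + 4).toNat = a + 4 by omega, show ((b : Int)).toNat = b by omega]
          exact hall 4 (by omega)
        · apply K (by omega) (by omega) (by omega) (by omega)
          rw [show ((a : Int) + 5).toNat = a + 5 by omega, show ((b : Int)).toNat = b by omega]
          exact hall 5 (by omega)
      · left
        left
        right
        refine ⟨by omega, ⟨⟨⟨⟨?_, ?_⟩, ?_⟩, ?_⟩, ?_⟩⟩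
        · apply K (by omega) (by omega) (by omega) (by omega)
          rw [show ((a : Int)).toNat = a by omega, show ((b : Int) + 1).toNat = b + 1 by omega]
          exact hall 1 (by omega)
        · apply K (by omega) (by omega) (by omega) (by omega)
          rw [show ((a : Int)).toNat = a by omega, show ((b : Int) + 2).toNat = b + 2 by omega]
          exact hall 2 (by omega)
        · apply K (by omega) (by omega) (by omega) (by omega)
          rw [show ((a : Int)).toNat = a by omega, show ((b : Int) + 3).toNat = b + 3 by omega]
          exact hall 3 (by omega)
        · apply K (by omega) (by omega) (by omega) (by omega)
          rw [show ((a : Int)).toNat = a by omega, show ((b : Int) + 4).toNat = b + 4 by omega]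
          exact hall 4 (by omega)
        · apply K (by omega) (by omega) (by omega) (by omega)
          rw [show ((a : Int)).toNat = a by omega, show ((b : Int) + 5).toNat = b + 5 by omega]
          exact hall 5 (by omega)
      · left
        right
        refine ⟨⟨by omega, by omega⟩, ⟨⟨⟨⟨?_, ?_⟩, ?_⟩, ?_⟩, ?_⟩⟩
        · apply K (by omega) (by omega) (by omega) (by omega)
          rw [show ((a : Int) + 1).toNat = a + 1 by omega, show ((b : Int) + 1).toNat = b + 1 by omega]
          exact hall 1 (by omega)
        · apply K (by omega) (by omega) (by omega) (by omega)
          rw [show ((a : Int) + 2).toNat = a + 2 by omega, show ((b : Int) + 2).toNat = b + 2 by omega]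
          exact hall 2 (by omega)
        · apply K (by omega) (by omega) (by omega) (by omega)
          rw [show ((a : Int) + 3).toNat = a + 3 by omega, show ((b : Int) + 3).toNat = b + 3 by omega]
          exact hall 3 (by omega)
        · apply K (by omega) (by omega) (by omega) (by omega)
          rw [show ((a : Int) + 4).toNat = a + 4 by omega, show ((b : Int) + 4).toNat = b + 4 by omega]
          exact hall 4 (by omega)
        · apply K (by omega) (by omega) (by omega) (by omega)
          rw [show ((a : Int) + 5).toNat = a + 5 by omega, show ((b : Int) + 5).toNat = b + 5 by omega]
          exact hall 5 (by omega)
      · right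
        refine ⟨⟨by omega, by omega⟩, ⟨⟨⟨⟨?_, ?_⟩, ?_⟩, ?_⟩, ?_⟩⟩
        · apply K (by omega) (by omega) (by omega) (by omega)
          rw [show ((a : Int) + 1).toNat = a + 1 by omega, show ((b : Int) - 1).toNat = b - 1 by omega]
          exact hall 1 (by omega)
        · apply K (by omega) (by omega) (by omega) (by omega)
          rw [show ((a : Int) + 2).toNat = a + 2 by omega, show ((b : Int) - 2).toNat = b - 2 by omega]
          exact hall 2 (by omega)
        · apply K (by omega) (by omega) (by omega) (by omega)
          rw [show ((a : Int) + 3).toNat = a + 3 by omega, show ((b : Int) - 3).toNat = b - 3 by omega]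
          exact hall 3 (by omega)
        · apply K (by omega) (by omega) (by omega) (by omega)
          rw [show ((a : Int) + 4).toNat = a + 4 by omega, show ((b : Int) - 4).toNat = b - 4 by omega]
          exact hall 4 (by omega)
        · apply K (by omega) (by omega) (by omega) (by omega)
          rw [show ((a : Int) + 5).toNat = a + 5 by omega, show ((b : Int) - 5).toNat = b - 5 by omega]
          exact hall 5 (by omega)

lemma prefix_hash6 (t : List Char) :
    ("######".toList <+: t) ↔ 6 ≤ t.length ∧ ∀ u < 6, t.getD u ' ' = '#' := by
  have hh : "######".toList = ['#','#','#','#','#','#'] := by decide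
  rw [hh]
  constructor
  · intro h
    have hl : 6 ≤ t.length := by simpa using h.length_le
    refine ⟨hl, ?_⟩
    intro u hu
    have hu' : u < t.length := by omega
    rw [List.getD_eq_getElem t ' ' hu']
    have := List.IsPrefix.getElem h (i := u) (by simp; omega)
    refine this.symm.trans ?_
    interval_cases u <;> rfl
  · rintro ⟨hl, hall⟩
    have htake : t.take 6 = ['#','#','#','#','#','#'] := by
      apply List.ext_getElem
      · simp; omega
      · intro u h1 h2
        have hu6 : u < 6 := by simpa using h2
        have hu' : u < t.length := by omega
        rw [List.getElem_take]
        have := hall u hu6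
        rw [List.getD_eq_getElem t ' ' hu'] at this
        rw [this]
        interval_cases u <;> rfl
    rw [← htake]
    exact List.take_prefix 6 t

lemma isIn_hash6 (l : List Char) :
    PySem.Chars.isIn "######".toList l = true ↔
      ∃ k, k + 6 ≤ l.length ∧ ∀ t < 6, l.getD (k+t) ' ' = '#' := by
  rw [← PySem.Chars.exists_prefix_drop_iff_isIn]
  constructor
  · rintro ⟨k, hk⟩
    rw [prefix_hash6] at hk
    obtain ⟨hlen, hall⟩ := hk
    refine ⟨k, by simp at hlen; omega, ?_⟩
    intro t ht
    have := hall t ht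
    rwa [List.getD_eq_getElem?_getD, List.getElem?_drop, ← List.getD_eq_getElem?_getD] at this
  · rintro ⟨k, hk, hall⟩
    refine ⟨k, ?_⟩
    rw [prefix_hash6]
    refine ⟨by simp; omega, ?_⟩
    intro u hu
    rw [List.getD_eq_getElem?_getD, List.getElem?_drop, ← List.getD_eq_getElem?_getD]
    exact hall u hu

lemma length_pvRows (N : Int) (S : List String) : (pvRows N S).length = N.toNat := by
  simp [pvRows, PySem.List.length_pyRange_one]

lemma pvRows_getD (N : Int) (S : List String) {i : Nat} (hi : i < N.toNat) :
    (pvRows N S).getD i [] = ((S.getD i "").toList).take N.toNat := by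
  have hlen : i < (pvRows N S).length := by rw [length_pvRows]; omega
  rw [List.getD_eq_getElem _ [] hlen]
  simp only [pvRows, List.getElem_map, PySem.List.getElem_pyRange_one]
  rw [show (0 : Int) + (i : Int) = ((i : Nat) : Int) by omega]
  rw [PySem.List.pyGetD_natCast, PySem.List.slice_to _ (by omega)]

lemma row_len (N : Int) (S : List String) (hPre : Pre_check N S) {i : Nat} (hi : i < N.toNat) :
    ((pvRows N S).getD i []).length = N.toNat := by
  rw [pvRows_getD N S hi, List.length_take]
  have := row_long N S hPre hi
  omega

lemma row_getD (N : Int) (S : List String) (hPre : Pre_check N S) {i j : Nat}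
    (hi : i < N.toNat) (hj : j < N.toNat) :
    ((pvRows N S).getD i []).getD j ' ' = pvG S i j := by
  have hcs : j < (S.getD i "").toList.length := by have := row_long N S hPre hi; omega
  have h1 : j < ((pvRows N S).getD i []).length := by rw [row_len N S hPre hi]; omega
  rw [List.getD_eq_getElem _ ' ' h1, pvG, List.getD_eq_getElem _ ' ' hcs]
  simp only [pvRows_getD N S hi, List.getElem_take]

lemma length_line (a b : Int) (f : Int → Char) :
    ((PySem.List.pyRange a b 1).map f).length = (b - a).toNat := by
  simp [PySem.List.length_pyRange_one]

lemma lineGetD (a b : Int) (f : Int → Char) {u : Nat} (hu : u < (b - a).toNat) :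
    ((PySem.List.pyRange a b 1).map f).getD u ' ' = f (a + u) := by
  have hlen : u < ((PySem.List.pyRange a b 1).map f).length := by
    rw [length_line]; omega
  rw [List.getD_eq_getElem _ ' ' hlen]
  simp [PySem.List.getElem_pyRange_one]

lemma cellFun (N : Int) (S : List String) (hPre : Pre_check N S) {i : Nat} {jI : Int}
    (hi : i < N.toNat) (hj0 : 0 ≤ jI) (hjN : jI < N) :
    PySem.List.pyGetD (PySem.List.pyGetD (pvRows N S) ((i : Nat) : Int) []) jI ' '
      = pvG S i jI.toNat := by
  rw [PySem.List.pyGetD_natCast]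
  rw [show jI = ((jI.toNat : Nat) : Int) by omega, PySem.List.pyGetD_natCast]
  exact row_getD N S hPre hi (by omega)

lemma rowsCase (N : Int) (S : List String) (hPre : Pre_check N S) :
    (∃ l ∈ pvRows N S, PySem.Chars.isIn "######".toList l = true) ↔
      ∃ i j : Nat, i < N.toNat ∧ j + 6 ≤ N.toNat ∧ ∀ t < 6, pvG S i (j+t) = '#' := by
  constructor
  · rintro ⟨l, hm, hIn⟩
    obtain ⟨i, hilen, rfl⟩ := List.mem_iff_getElem.mp hm
    have hi : i < N.toNat := by rwa [length_pvRows] at hilen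
    rw [show (pvRows N S)[i] = (pvRows N S).getD i [] from (List.getD_eq_getElem _ [] hilen).symm,
      isIn_hash6] at hIn
    obtain ⟨k, hk, hall⟩ := hIn
    rw [row_len N S hPre hi] at hk
    refine ⟨i, k, hi, hk, ?_⟩
    intro t ht
    have h := hall t ht
    rwa [row_getD N S hPre hi (by omega)] at h
  · rintro ⟨i, j, hi, hj, hall⟩
    refine ⟨(pvRows N S).getD i [], ?_, ?_⟩
    · have hilen : i < (pvRows N S).length := by rw [length_pvRows]; omega
      rw [List.getD_eq_getElem _ [] hilen]; exact List.getElem_mem _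
    · rw [isIn_hash6]
      refine ⟨j, by rw [row_len N S hPre hi]; omega, ?_⟩
      intro t ht
      rw [row_getD N S hPre hi (by omega)]
      exact hall t ht

lemma colGetD (N : Int) (S : List String) (hPre : Pre_check N S) {b i : Nat}
    (hb : b < N.toNat) (hi : i < N.toNat) :
    ((pvRows N S).map (fun r => PySem.List.pyGetD r ((b : Nat) : Int) ' ')).getD i ' '
      = pvG S i b := by
  have hlen : i < ((pvRows N S).map (fun r => PySem.List.pyGetD r ((b : Nat) : Int) ' ')).length := by
    rw [List.length_map, length_pvRows]; omega
  have hlen' : i < (pvRows N S).length := by rw [length_pvRows]; omega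
  rw [List.getD_eq_getElem _ ' ' hlen, List.getElem_map, PySem.List.pyGetD_natCast,
    show (pvRows N S)[i] = (pvRows N S).getD i [] from (List.getD_eq_getElem _ [] hlen').symm]
  exact row_getD N S hPre hi hb

lemma colsCase (N : Int) (S : List String) (hPre : Pre_check N S) :
    (∃ l ∈ (PySem.List.pyRange 0 N 1).map
        (fun j => (pvRows N S).map (fun r => PySem.List.pyGetD r j ' ')),
      PySem.Chars.isIn "######".toList l = true) ↔
      ∃ i j : Nat, i + 6 ≤ N.toNat ∧ j < N.toNat ∧ ∀ t < 6, pvG S (i+t) j = '#' := by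
  constructor
  · rintro ⟨l, hm, hIn⟩
    rw [List.mem_map] at hm
    obtain ⟨jI, hjmem, rfl⟩ := hm
    rw [PySem.List.mem_pyRange_one] at hjmem
    obtain ⟨b, rfl⟩ : ∃ b : Nat, jI = ((b : Nat) : Int) := ⟨jI.toNat, by omega⟩
    have hb : b < N.toNat := by omega
    rw [isIn_hash6] at hIn
    obtain ⟨k, hk, hall⟩ := hIn
    rw [List.length_map, length_pvRows] at hk
    refine ⟨k, b, hk, hb, ?_⟩
    intro t ht
    have h := hall t ht
    rwa [colGetD N S hPre hb (by omega)] at h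
  · rintro ⟨i, j, hi, hj, hall⟩
    refine ⟨(pvRows N S).map (fun r => PySem.List.pyGetD r ((j : Nat) : Int) ' '), ?_, ?_⟩
    · exact List.mem_map.mpr ⟨((j : Nat) : Int),
        PySem.List.mem_pyRange_one.mpr ⟨by omega, by omega⟩, rfl⟩
    · rw [isIn_hash6]
      refine ⟨i, by rw [List.length_map, length_pvRows]; omega, ?_⟩
      intro t ht
      rw [colGetD N S hPre hj (by omega)]
      exact hall t ht

lemma diagsCase (N : Int) (S : List String) (hPre : Pre_check N S) :
    (∃ l ∈ (PySem.List.pyRange (-(N-1)) N 1).map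
        (fun d => (PySem.List.pyRange (max d 0) (min N (N+d)) 1).map
          (fun i => PySem.List.pyGetD (PySem.List.pyGetD (pvRows N S) i []) (i - d) ' ')),
      PySem.Chars.isIn "######".toList l = true) ↔
      ∃ i j : Nat, i + 6 ≤ N.toNat ∧ j + 6 ≤ N.toNat ∧ ∀ t < 6, pvG S (i+t) (j+t) = '#' := by
  constructor
  · rintro ⟨l, hm, hIn⟩
    rw [List.mem_map] at hm
    obtain ⟨d, hdmem, rfl⟩ := hm
    rw [PySem.List.mem_pyRange_one] at hdmem
    rw [isIn_hash6] at hIn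
    obtain ⟨k, hk, hall⟩ := hIn
    rw [length_line] at hk
    set A : Nat := (max d 0).toNat with hA
    have hAeq : ((A : Nat) : Int) = max d 0 := by
      rw [hA]; exact Int.toNat_of_nonneg (le_max_right d 0)
    refine ⟨A + k, (((A : Nat) : Int) + k - d).toNat, by omega, by omega, ?_⟩
    intro t ht
    have h := hall t ht
    rw [lineGetD _ _ _ (by omega)] at h
    rw [show max d 0 + (((k + t : Nat)) : Int) = (((A + k + t : Nat)) : Int) by omega] at h
    rw [cellFun N S hPre (by omega) (by omega) (by omega)] at h
    rw [show (((A : Nat) : Int) + k - d).toNat + t = ((((A + k + t : Nat)) : Int) - d).toNat by omega]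
    exact h
  · rintro ⟨i, j, hi6, hj6, hall⟩
    refine ⟨_, List.mem_map.mpr ⟨((i : Int) - (j : Int)),
      PySem.List.mem_pyRange_one.mpr ⟨by omega, by omega⟩, rfl⟩, ?_⟩
    rw [isIn_hash6]
    set d : Int := (i : Int) - (j : Int) with hd
    set A : Nat := (max d 0).toNat with hA
    have hAeq : ((A : Nat) : Int) = max d 0 := by
      rw [hA]; exact Int.toNat_of_nonneg (le_max_right d 0)
    have hAi : A ≤ i := by omega
    refine ⟨i - A, ?_, ?_⟩
    · rw [length_line]; omega
    · intro t ht
      rw [lineGetD _ _ _ (by omega)]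
      rw [show max d 0 + (((i - A + t : Nat)) : Int) = (((i + t : Nat)) : Int) by omega]
      rw [cellFun N S hPre (by omega) (by omega) (by omega)]
      rw [show ((((i + t : Nat)) : Int) - d).toNat = j + t by omega]
      exact hall t ht

lemma antisCase (N : Int) (S : List String) (hPre : Pre_check N S) :
    (∃ l ∈ (PySem.List.pyRange 0 (2*N-1) 1).map
        (fun s2 => (PySem.List.pyRange (max 0 (s2-N+1)) (min N (s2+1)) 1).map
          (fun i => PySem.List.pyGetD (PySem.List.pyGetD (pvRows N S) i []) (s2 - i) ' ')),
      PySem.Chars.isIn "######".toList l = true) ↔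
      ∃ i j : Nat, i + 6 ≤ N.toNat ∧ 5 ≤ j ∧ j < N.toNat ∧ ∀ t < 6, pvG S (i+t) (j-t) = '#' := by
  constructor
  · rintro ⟨l, hm, hIn⟩
    rw [List.mem_map] at hm
    obtain ⟨s2, hsmem, rfl⟩ := hm
    rw [PySem.List.mem_pyRange_one] at hsmem
    rw [isIn_hash6] at hIn
    obtain ⟨k, hk, hall⟩ := hIn
    rw [length_line] at hk
    set A : Nat := (max 0 (s2-N+1)).toNat with hA
    have hAeq : ((A : Nat) : Int) = max 0 (s2-N+1) := by
      rw [hA]; exact Int.toNat_of_nonneg (le_max_left 0 (s2-N+1))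
    refine ⟨A + k, (s2 - ((A + k : Nat) : Int)).toNat, by omega, by omega, by omega, ?_⟩
    intro t ht
    have h := hall t ht
    rw [lineGetD _ _ _ (by omega)] at h
    rw [show max 0 (s2-N+1) + (((k + t : Nat)) : Int) = (((A + k + t : Nat)) : Int) by omega] at h
    rw [cellFun N S hPre (by omega) (by omega) (by omega)] at h
    rw [show (s2 - ((A + k : Nat) : Int)).toNat - t = (s2 - (((A + k + t : Nat)) : Int)).toNat by omega]
    exact h
  · rintro ⟨i, j, hi6, hj5, hjN, hall⟩
    refine ⟨_, List.mem_map.mpr ⟨((i : Int) + (j : Int)),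
      PySem.List.mem_pyRange_one.mpr ⟨by omega, by omega⟩, rfl⟩, ?_⟩
    rw [isIn_hash6]
    set s2 : Int := (i : Int) + (j : Int) with hs
    set A : Nat := (max 0 (s2-N+1)).toNat with hA
    have hAeq : ((A : Nat) : Int) = max 0 (s2-N+1) := by
      rw [hA]; exact Int.toNat_of_nonneg (le_max_left 0 (s2-N+1))
    have hAi : A ≤ i := by omega
    refine ⟨i - A, ?_, ?_⟩
    · rw [length_line]; omega
    · intro t ht
      rw [lineGetD _ _ _ (by omega)]
      rw [show max 0 (s2-N+1) + (((i - A + t : Nat)) : Int) = (((i + t : Nat)) : Int) by omega]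
      rw [cellFun N S hPre (by omega) (by omega) (by omega)]
      rw [show (s2 - (((i + t : Nat)) : Int)).toNat = j - t by omega]
      exact hall t ht

lemma check_neg (N : Int) (S : List String) (hN : N ≤ 0) :
    check N S = false ∧ check_alt N S = false := by
  constructor
  · simp [check, PySem.List.pyRange_one_eq_nil hN]
  · simp [check_alt, pvRows, PySem.List.pyRange_one_eq_nil hN,
      PySem.List.pyRange_one_eq_nil (show 2*N-1 ≤ 0 by omega)]
    intro x h1 h2
    omega

lemma check_alt_iff (N : Int) (S : List String) (hPre : Pre_check N S) :
    check_alt N S = true ↔ pvRun N S := by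
  rw [check_alt]
  simp only [List.any_eq_true, List.mem_append]
  constructor
  · rintro ⟨l, hm, hIn⟩
    rcases hm with ((h | h) | h) | h
    · obtain ⟨i, j, h1, h2, h3⟩ := (rowsCase N S hPre).mp ⟨l, h, hIn⟩
      exact ⟨i, j, by omega, by omega, Or.inr (Or.inl ⟨h2, h3⟩)⟩
    · obtain ⟨i, j, h1, h2, h3⟩ := (colsCase N S hPre).mp ⟨l, h, hIn⟩
      exact ⟨i, j, by omega, by omega, Or.inl ⟨h1, h3⟩⟩
    · obtain ⟨i, j, h1, h2, h3⟩ := (diagsCase N S hPre).mp ⟨l, h, hIn⟩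
      exact ⟨i, j, by omega, by omega, Or.inr (Or.inr (Or.inl ⟨h1, h2, h3⟩))⟩
    · obtain ⟨i, j, h1, h2, h3, h4⟩ := (antisCase N S hPre).mp ⟨l, h, hIn⟩
      exact ⟨i, j, by omega, by omega, Or.inr (Or.inr (Or.inr ⟨h1, h2, h4⟩))⟩
  · rintro ⟨i, j, hi, hj, hcase⟩
    rcases hcase with ⟨hg, hall⟩ | ⟨hg, hall⟩ | ⟨hg, hg', hall⟩ | ⟨hg, hg', hall⟩
    · obtain ⟨l, hm, hIn⟩ := (colsCase N S hPre).mpr ⟨i, j, hg, hj, hall⟩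
      exact ⟨l, Or.inl (Or.inl (Or.inr hm)), hIn⟩
    · obtain ⟨l, hm, hIn⟩ := (rowsCase N S hPre).mpr ⟨i, j, hi, hg, hall⟩
      exact ⟨l, Or.inl (Or.inl (Or.inl hm)), hIn⟩
    · obtain ⟨l, hm, hIn⟩ := (diagsCase N S hPre).mpr ⟨i, j, hg, hg', hall⟩
      exact ⟨l, Or.inl (Or.inr hm), hIn⟩
    · obtain ⟨l, hm, hIn⟩ := (antisCase N S hPre).mpr ⟨i, j, hg, hg', hj, hall⟩
      exact ⟨l, Or.inr hm, hIn⟩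

-- ===== VERDICT (by name: the statement is the Claim_ definition above) =====
theorem check_spec : Claim_equal_check := by
  intro N S hDom hPre
  unfold Spec_check
  by_cases hN : N ≤ 0
  · obtain ⟨ha, hb⟩ := check_neg N S hN
    rw [ha, hb]
  · rw [Bool.eq_iff_iff, check_iff N S hPre, check_alt_iff N S hPre]
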